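-- pv_equiv track=rewrite | github.com/brandonching/CSCI406 | Project 3/timberproblem.py | timber_bottom_up
-- ===== SOURCE A (Python) =====
-- def timber_bottom_up(log_sizes):
--     '''
--     This function solves the timber problem using a bottom-up approach
--     :param log_sizes: A list of log sizes
--     :return: The maximum value that can be obtained from cutting the logs
--     '''
--     n = len(log_sizes)
--     # Prefix sum of the log sizes
--     sums = [0] * n
--     for i in range(n):
--         sums[i] = log_sizes[i] + (sums[i - 1] if i > 0 else 0)
--
--     # Create a table to store the results and fill in the base case (i == j)
--     table = [[0 for _ in range(n)] for _ in range(n)]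
--     for i in range(n):
--         table[i][i] = log_sizes[i]
--
--     # Fill in the table using the bottom-up approach (traverse diagonally)
--     for diag in range(1, n):
--         for i in range(n - diag):
--             j = i + diag
--             table[i][j] = sums[j] - (sums[i - 1] if i > 0 else 0) - \
--                 min(table[i + 1][j], table[i][j - 1])
--
--     return table[0][n - 1]
-- ===== SOURCE B (Python) =====
-- def timber_bottom_up(log_sizes):
--     '''
--     Solves the timber problem via the score-difference minimax recurrence:
--     diff[j] holds the best achievable score difference (current mover minus
--     opponent) on the interval [i, j]; the answer is (total + diff) // 2.
--     :param log_sizes: A list of log sizes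
--     :return: The maximum value that can be obtained from cutting the logs
--     '''
--     n = len(log_sizes)
--     diff = list(log_sizes)
--     for i in range(n - 2, -1, -1):
--         for j in range(i + 1, n):
--             diff[j] = max(log_sizes[i] - diff[j], log_sizes[j] - diff[j - 1])
--     return (sum(log_sizes) + diff[n - 1]) // 2
-- ===== Notes on version B (the rewrite author's own statement) =====
-- stated objective: alternative
-- what changed: Replaces A's prefix-sum total DP (2D table of interval totals filled by diagonals with t = interval sum - min of subgames) by the score-difference minimax recurrence: one 1-D array updated in place row by row from the bottom with d = max(a[i] - d_below, a[j] - d_left), no prefix sums and no 2D table, recovering the answer as (sum + d) // 2.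
import Mathlib
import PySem

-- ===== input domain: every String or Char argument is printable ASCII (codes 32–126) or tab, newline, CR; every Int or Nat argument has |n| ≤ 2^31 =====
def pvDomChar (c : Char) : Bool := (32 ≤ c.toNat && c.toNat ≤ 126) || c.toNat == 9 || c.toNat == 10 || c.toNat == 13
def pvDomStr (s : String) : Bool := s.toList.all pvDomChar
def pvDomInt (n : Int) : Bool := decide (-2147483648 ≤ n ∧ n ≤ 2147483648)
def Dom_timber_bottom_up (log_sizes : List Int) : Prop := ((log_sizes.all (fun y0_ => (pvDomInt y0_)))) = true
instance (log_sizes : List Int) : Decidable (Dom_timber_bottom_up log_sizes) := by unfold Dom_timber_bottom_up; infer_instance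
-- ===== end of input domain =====

-- B replaces A's prefix-sum 2-D table DP (filled by diagonals, value = interval sum minus
-- min of subgame totals) with the score-difference minimax recurrence: a single 1-D array
-- updated in place row by row, d = max(a[i] - d_below, a[j] - d_left), answer (sum + d) // 2.

-- ===== PORT A =====
def timber_bottom_up (log_sizes : List Int) : Int :=
  let n : Int := PySem.List.len log_sizes
  let sums : List Int :=
    (PySem.List.pyRange 0 n 1).foldl
      (fun sums i =>
        PySem.List.pySetD sums i
          (PySem.List.pyGetD log_sizes i 0 +
            (if i > 0 then PySem.List.pyGetD sums (i - 1) 0 else 0)))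
      (PySem.List.pyRepeat [(0 : Int)] n)
  let table : List (List Int) :=
    (PySem.List.pyRange 0 n 1).map (fun _ => (PySem.List.pyRange 0 n 1).map (fun _ => (0 : Int)))
  let table :=
    (PySem.List.pyRange 0 n 1).foldl
      (fun table i =>
        PySem.List.pySetD table i
          (PySem.List.pySetD (PySem.List.pyGetD table i []) i (PySem.List.pyGetD log_sizes i 0)))
      table
  let table :=
    (PySem.List.pyRange 1 n 1).foldl
      (fun table diag =>
        (PySem.List.pyRange 0 (n - diag) 1).foldl
          (fun table i =>
            let j := i + diag
            PySem.List.pySetD table i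
              (PySem.List.pySetD (PySem.List.pyGetD table i []) j
                (PySem.List.pyGetD sums j 0 -
                  (if i > 0 then PySem.List.pyGetD sums (i - 1) 0 else 0) -
                  min (PySem.List.pyGetD (PySem.List.pyGetD table (i + 1) []) j 0)
                      (PySem.List.pyGetD (PySem.List.pyGetD table i []) (j - 1) 0))))
          table)
      table
  PySem.List.pyGetD (PySem.List.pyGetD table 0 []) (n - 1) 0

-- ===== PORT B =====
def timber_bottom_up_alt (log_sizes : List Int) : Int :=
  let n : Int := PySem.List.len log_sizes
  let diff : List Int := log_sizes
  let diff :=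
    (PySem.List.pyRange (n - 2) (-1) (-1)).foldl
      (fun diff i =>
        (PySem.List.pyRange (i + 1) n 1).foldl
          (fun diff j =>
            PySem.List.pySetD diff j
              (max (PySem.List.pyGetD log_sizes i 0 - PySem.List.pyGetD diff j 0)
                   (PySem.List.pyGetD log_sizes j 0 - PySem.List.pyGetD diff (j - 1) 0)))
          diff)
      diff
  PySem.Int.floordiv (log_sizes.sum + PySem.List.pyGetD diff (n - 1) 0) 2

-- ===== PRECONDITION & SPEC =====
-- Pre_ excludes only the empty list, on which both A and B raise IndexError.
def Pre_timber_bottom_up (log_sizes : List Int) : Prop := log_sizes ≠ []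
instance (log_sizes : List Int) : Decidable (Pre_timber_bottom_up log_sizes) := by
  unfold Pre_timber_bottom_up; infer_instance
def pvWitness_timber_bottom_up : List Int := [3, 5, 2]
def Spec_timber_bottom_up (log_sizes : List Int) (out : Int) : Prop := out = timber_bottom_up_alt log_sizes
instance (log_sizes : List Int) (out : Int) : Decidable (Spec_timber_bottom_up log_sizes out) := by unfold Spec_timber_bottom_up; infer_instance

-- ===== CLAIM (what is proved, stated in full; the proofs are below) =====
def Claim_equal_timber_bottom_up : Prop := ∀ (log_sizes : List Int), Dom_timber_bottom_up log_sizes → Pre_timber_bottom_up log_sizes → Spec_timber_bottom_up log_sizes (timber_bottom_up log_sizes)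

-- ===== LEMMAS AND PROOFS =====

def pvPfx (xs : List Int) (k : Nat) : Int := (xs.take k).sum

lemma pvPfx_succ (xs : List Int) (k : Nat) (hk : k < xs.length) :
    pvPfx xs (k + 1) = pvPfx xs k + xs.getD k 0 := by
  unfold pvPfx
  rw [List.getD_eq_getElem?_getD, List.getElem?_eq_getElem hk]
  exact List.sum_take_succ xs k hk

lemma pvPfx_zero (xs : List Int) : pvPfx xs 0 = 0 := rfl

-- A's table value: total obtainable by the player to move on the interval [i, j]
def pvT (xs : List Int) (i j : Nat) : Int :=
  if _h : i < j then
    pvPfx xs (j + 1) - pvPfx xs i - min (pvT xs (i + 1) j) (pvT xs i (j - 1))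
  else xs.getD i 0
termination_by j - i
decreasing_by all_goals omega

lemma pvSetMapRange {α : Type} {n m : Nat} (g : Nat → α) (v : α) (hm : m < n) :
    ((List.range n).map g).set m v
      = (List.range n).map (fun k => if k = m then v else g k) := by
  apply List.ext_getElem
  · simp
  intro i h1 h2
  simp only [List.length_map, List.length_range] at h1
  rw [List.getElem_set]
  simp only [List.getElem_map, List.getElem_range]
  split_ifs with h3 h4 h4
  · rfl
  · omega
  · omega
  · rfl

lemma pvSums_inv (xs : List Int) (m : Nat) (hm : m ≤ xs.length) :
    (PySem.List.pyRange 0 (m : Int) 1).foldl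
      (fun sums i =>
        PySem.List.pySetD sums i
          (PySem.List.pyGetD xs i 0 +
            (if i > 0 then PySem.List.pyGetD sums (i - 1) 0 else 0)))
      (List.replicate xs.length (0 : Int))
    = (List.range xs.length).map (fun k => if k < m then pvPfx xs (k + 1) else 0) := by
  induction m with
  | zero =>
    rw [show ((0 : Nat) : Int) = 0 by norm_num, PySem.List.pyRange_one_eq_nil (by omega)]
    simp only [List.foldl_nil]
    apply List.ext_getElem
    · simp
    intro i h1 h2
    simp [List.getElem_replicate]
  | succ m ih =>
    rw [show ((m + 1 : Nat) : Int) = (m : Int) + 1 by push_cast; ring,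
      PySem.List.pyRange_one_succ_right (by omega), List.foldl_append, ih (by omega),
      List.foldl_cons, List.foldl_nil]
    have hv :
        (PySem.List.pyGetD xs (m : Int) 0 +
          if (m : Int) > 0 then
            PySem.List.pyGetD
              ((List.range xs.length).map (fun k => if k < m then pvPfx xs (k + 1) else 0))
              ((m : Int) - 1) 0
          else 0) = pvPfx xs (m + 1) := by
      rw [PySem.List.pyGetD_natCast, pvPfx_succ xs m (by omega)]
      by_cases hm0 : m = 0
      · subst hm0
        rw [if_neg (by omega), pvPfx_zero]
        ring
      · rw [if_pos (by omega), show ((m : Int) - 1) = ((m - 1 : Nat) : Int) by omega,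
          PySem.List.pyGetD_natCast, PySem.List.getD_map_range _ _ _ _ (by omega),
          if_pos (by omega), show m - 1 + 1 = m by omega]
        ring
    rw [hv, PySem.List.pySetD_natCast, pvSetMapRange _ _ (by omega)]
    apply List.map_congr_left
    intro k hk
    simp only [List.mem_range] at hk
    split_ifs with h1 h2 h2 <;> first | (subst h1; rfl) | rfl | omega

def pvTab (n : Nat) (e : Nat → Nat → Int) : List (List Int) :=
  (List.range n).map (fun i => (List.range n).map (e i))

lemma pvTab_congr {n : Nat} {e e' : Nat → Nat → Int}
    (h : ∀ i < n, ∀ j < n, e i j = e' i j) : pvTab n e = pvTab n e' := by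
  unfold pvTab
  apply List.map_congr_left
  intro i hi
  simp only [List.mem_range] at hi
  apply List.map_congr_left
  intro j hj
  simp only [List.mem_range] at hj
  exact h i hi j hj

lemma pvTab_get {n : Nat} (e : Nat → Nat → Int) (i : Nat) (hi : i < n) :
    PySem.List.pyGetD (pvTab n e) ((i : Nat) : Int) [] = (List.range n).map (e i) := by
  rw [PySem.List.pyGetD_natCast]
  exact PySem.List.getD_map_range _ _ _ _ hi

lemma pvTab_update {n : Nat} (e : Nat → Nat → Int) (i j : Nat) (v : Int)
    (hi : i < n) (hj : j < n) :
    PySem.List.pySetD (pvTab n e) ((i : Nat) : Int)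
      (PySem.List.pySetD (PySem.List.pyGetD (pvTab n e) ((i : Nat) : Int) []) ((j : Nat) : Int) v)
    = pvTab n (fun a b => if a = i ∧ b = j then v else e a b) := by
  rw [pvTab_get e i hi, PySem.List.pySetD_natCast, PySem.List.pySetD_natCast,
    pvSetMapRange _ _ hj]
  show (pvTab n e).set i _ = _
  unfold pvTab
  rw [pvSetMapRange _ _ hi]
  apply List.map_congr_left
  intro a ha
  simp only [List.mem_range] at ha
  by_cases hai : a = i
  · subst hai
    rw [if_pos rfl]
    apply List.map_congr_left
    intro b hb
    simp only [List.mem_range] at hb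
    beta_reduce
    by_cases hbj : b = j
    · subst hbj; simp
    · rw [if_neg hbj, if_neg (by tauto)]
  · rw [if_neg hai]
    apply List.map_congr_left
    intro b hb
    beta_reduce
    rw [if_neg (by tauto)]

def pvEin (xs : List Int) (d mm i j : Nat) : Int :=
  if i ≤ j ∧ j < xs.length ∧ (j - i < d ∨ (j - i = d ∧ i < mm)) then pvT xs i j else 0

def pvSumsL (xs : List Int) : List Int :=
  (List.range xs.length).map (fun k => pvPfx xs (k + 1))

lemma pvBase_inv (xs : List Int) (m : Nat) (hm : m ≤ xs.length) :
    (PySem.List.pyRange 0 (m : Int) 1).foldl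
      (fun table i =>
        PySem.List.pySetD table i
          (PySem.List.pySetD (PySem.List.pyGetD table i []) i (PySem.List.pyGetD xs i 0)))
      (pvTab xs.length (fun _ _ => 0))
    = pvTab xs.length (fun i j => if i = j ∧ i < m then xs.getD i 0 else 0) := by
  induction m with
  | zero =>
    rw [show ((0 : Nat) : Int) = 0 by norm_num, PySem.List.pyRange_one_eq_nil (by omega)]
    simp only [List.foldl_nil]
    apply pvTab_congr
    intro i _ j _
    rw [if_neg (by omega)]
  | succ m ih =>
    rw [show ((m + 1 : Nat) : Int) = (m : Int) + 1 by push_cast; ring,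
      PySem.List.pyRange_one_succ_right (by omega), List.foldl_append, ih (by omega),
      List.foldl_cons, List.foldl_nil,
      pvTab_update _ m m _ (by omega) (by omega)]
    apply pvTab_congr
    intro i hi j hj
    beta_reduce
    by_cases hij : i = j ∧ i = m
    · obtain ⟨h1, h2⟩ := hij
      subst h1; subst h2
      simp
    · rw [if_neg (by omega)]
      split_ifs with h1 h2 h2 <;> try rfl
      · omega
      · omega

lemma pvInner_inv (xs : List Int) (d : Nat) (hd : 1 ≤ d) (hdn : d < xs.length)
    (m : Nat) (hm : m ≤ xs.length - d) :
    (PySem.List.pyRange 0 (m : Int) 1).foldl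
      (fun table i =>
        PySem.List.pySetD table i
          (PySem.List.pySetD (PySem.List.pyGetD table i []) (i + (d : Int))
            (PySem.List.pyGetD (pvSumsL xs) (i + (d : Int)) 0 -
              (if i > 0 then PySem.List.pyGetD (pvSumsL xs) (i - 1) 0 else 0) -
              min (PySem.List.pyGetD (PySem.List.pyGetD table (i + 1) []) (i + (d : Int)) 0)
                  (PySem.List.pyGetD (PySem.List.pyGetD table i []) (i + (d : Int) - 1) 0))))
      (pvTab xs.length (pvEin xs d 0))
    = pvTab xs.length (pvEin xs d m) := by
  induction m with
  | zero =>
    rw [show ((0 : Nat) : Int) = 0 by norm_num, PySem.List.pyRange_one_eq_nil (by omega)]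
    simp only [List.foldl_nil]
  | succ m ih =>
    rw [show ((m + 1 : Nat) : Int) = (m : Int) + 1 by push_cast; ring,
      PySem.List.pyRange_one_succ_right (by omega), List.foldl_append, ih (by omega),
      List.foldl_cons, List.foldl_nil]
    have c1 : ((m : Int) + (d : Int)) = ((m + d : Nat) : Int) := by omega
    have c2 : ((m : Int) + 1) = ((m + 1 : Nat) : Int) := by omega
    have c3 : ((m : Int) + (d : Int) - 1) = ((m + d - 1 : Nat) : Int) := by omega
    have s1 : PySem.List.pyGetD (pvSumsL xs) ((m + d : Nat) : Int) 0 = pvPfx xs (m + d + 1) := by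
      rw [PySem.List.pyGetD_natCast]
      exact PySem.List.getD_map_range _ _ _ _ (by omega)
    have s2 : (if (m : Int) > 0 then PySem.List.pyGetD (pvSumsL xs) ((m : Int) - 1) 0 else 0)
        = pvPfx xs m := by
      by_cases hm0 : m = 0
      · subst hm0; rw [if_neg (by omega), pvPfx_zero]
      · rw [if_pos (by omega), show ((m : Int) - 1) = ((m - 1 : Nat) : Int) by omega,
          PySem.List.pyGetD_natCast]
        unfold pvSumsL
        rw [PySem.List.getD_map_range _ _ _ _ (by omega), show m - 1 + 1 = m by omega]
    have t1 : PySem.List.pyGetD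
        (PySem.List.pyGetD (pvTab xs.length (pvEin xs d m)) (((m + 1 : Nat)) : Int) [])
        ((m + d : Nat) : Int) 0 = pvT xs (m + 1) (m + d) := by
      rw [pvTab_get _ _ (by omega), PySem.List.pyGetD_natCast,
        PySem.List.getD_map_range _ _ _ _ (by omega)]
      unfold pvEin
      rw [if_pos (by omega)]
    have t2 : PySem.List.pyGetD
        (PySem.List.pyGetD (pvTab xs.length (pvEin xs d m)) ((m : Nat) : Int) [])
        ((m + d - 1 : Nat) : Int) 0 = pvT xs m (m + d - 1) := by
      rw [pvTab_get _ _ (by omega), PySem.List.pyGetD_natCast,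
        PySem.List.getD_map_range _ _ _ _ (by omega)]
      unfold pvEin
      rw [if_pos (by omega)]
    rw [c3, c1, c2, s1, s2, t1, t2]
    have hv : pvPfx xs (m + d + 1) - pvPfx xs m - min (pvT xs (m + 1) (m + d)) (pvT xs m (m + d - 1))
        = pvT xs m (m + d) := by
      conv_rhs => rw [pvT]
      rw [dif_pos (by omega)]
    rw [hv, pvTab_update _ m (m + d) _ (by omega) (by omega)]
    apply pvTab_congr
    intro i hi j hj
    beta_reduce
    by_cases hij : i = m ∧ j = m + d
    · obtain ⟨h1, h2⟩ := hij
      subst h1; subst h2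
      rw [if_pos ⟨rfl, rfl⟩]
      unfold pvEin
      rw [if_pos (by omega)]
    · rw [if_neg (by omega)]
      unfold pvEin
      split_ifs with h1 h2 h2 <;> try rfl
      · omega
      · omega

lemma pvOuter_inv (xs : List Int) (d : Nat) (hd : 1 ≤ d) (hdn : d ≤ xs.length) :
    (PySem.List.pyRange 1 (d : Int) 1).foldl
      (fun table diag =>
        (PySem.List.pyRange 0 ((xs.length : Int) - diag) 1).foldl
          (fun table i =>
            PySem.List.pySetD table i
              (PySem.List.pySetD (PySem.List.pyGetD table i []) (i + diag)
                (PySem.List.pyGetD (pvSumsL xs) (i + diag) 0 -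
                  (if i > 0 then PySem.List.pyGetD (pvSumsL xs) (i - 1) 0 else 0) -
                  min (PySem.List.pyGetD (PySem.List.pyGetD table (i + 1) []) (i + diag) 0)
                      (PySem.List.pyGetD (PySem.List.pyGetD table i []) (i + diag - 1) 0))))
          table)
      (pvTab xs.length (pvEin xs 1 0))
    = pvTab xs.length (pvEin xs d 0) := by
  induction d with
  | zero => omega
  | succ d ih =>
    by_cases hd0 : d = 0
    · subst hd0
      rw [show ((1 : Nat) : Int) = 1 by norm_num, PySem.List.pyRange_one_eq_nil (by omega)]
      simp only [List.foldl_nil]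
    · rw [show ((d + 1 : Nat) : Int) = (d : Int) + 1 by push_cast; ring,
        PySem.List.pyRange_one_succ_right (by omega), List.foldl_append,
        ih (by omega) (by omega), List.foldl_cons, List.foldl_nil]
      beta_reduce
      rw [show ((xs.length : Int) - (d : Int)) = ((xs.length - d : Nat) : Int) by omega,
        pvInner_inv xs d (by omega) (by omega) (xs.length - d) le_rfl]
      apply pvTab_congr
      intro i hi j hj
      unfold pvEin
      split_ifs with h1 h2 h2 <;> try rfl
      · omega
      · omega

lemma pvA_eq (xs : List Int) (hx : xs ≠ []) :
    timber_bottom_up xs = pvT xs 0 (xs.length - 1) := by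
  have hn : 0 < xs.length := List.length_pos_iff.mpr hx
  unfold timber_bottom_up
  simp only [PySem.List.len_eq, PySem.List.pyRepeat_singleton, Int.toNat_natCast]
  rw [pvSums_inv xs xs.length le_rfl]
  have hs : (List.range xs.length).map (fun k => if k < xs.length then pvPfx xs (k + 1) else 0)
      = pvSumsL xs := by
    unfold pvSumsL
    apply List.map_congr_left
    intro k hk
    simp only [List.mem_range] at hk
    rw [if_pos hk]
  rw [hs]
  have htab0 : (PySem.List.pyRange 0 (xs.length : Int) 1).map
      (fun _ => (PySem.List.pyRange 0 (xs.length : Int) 1).map (fun _ => (0 : Int)))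
      = pvTab xs.length (fun _ _ => 0) := by
    rw [PySem.List.pyRange_zero_natCast]
    simp [pvTab, List.map_map, Function.comp_def, List.map_const']
  rw [htab0, pvBase_inv xs xs.length le_rfl]
  have hbase : pvTab xs.length (fun i j => if i = j ∧ i < xs.length then xs.getD i 0 else 0)
      = pvTab xs.length (pvEin xs 1 0) := by
    apply pvTab_congr
    intro i hi j hj
    unfold pvEin
    split_ifs with h1 h2 h2
    · have : i = j := by omega
      subst this
      rw [pvT, dif_neg (by omega)]
    · omega
    · omega
    · rfl
  rw [hbase, pvOuter_inv xs xs.length (by omega) le_rfl]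
  have hrow : PySem.List.pyGetD (pvTab xs.length (pvEin xs xs.length 0)) 0 []
      = (List.range xs.length).map (pvEin xs xs.length 0 0) := by
    have h := pvTab_get (n := xs.length) (pvEin xs xs.length 0) 0 (by omega)
    simpa using h
  rw [hrow, show ((xs.length : Int) - 1) = ((xs.length - 1 : Nat) : Int) by omega,
    PySem.List.pyGetD_natCast, PySem.List.getD_map_range _ _ _ _ (by omega)]
  unfold pvEin
  rw [if_pos (by omega)]

-- B's diff value: the best score DIFFERENCE (mover minus opponent) on the interval [i, j]
def pvD (xs : List Int) (i j : Nat) : Int :=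
  if _h : i < j then
    max (xs.getD i 0 - pvD xs (i + 1) j) (xs.getD j 0 - pvD xs i (j - 1))
  else xs.getD i 0
termination_by j - i
decreasing_by all_goals omega

lemma pvD_eq_pvT (xs : List Int) (i j : Nat) (hij : i ≤ j) (hj : j < xs.length) :
    pvD xs i j = 2 * pvT xs i j - (pvPfx xs (j + 1) - pvPfx xs i) := by
  have H : ∀ c i j, j - i = c → i ≤ j → j < xs.length →
      pvD xs i j = 2 * pvT xs i j - (pvPfx xs (j + 1) - pvPfx xs i) := by
    intro c
    induction c using Nat.strong_induction_on with
    | _ c ih =>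
      intro i j hc hij hj
      by_cases h : i < j
      · rw [pvD, dif_pos h, pvT, dif_pos h]
        have h1 := ih (j - (i + 1)) (by omega) (i + 1) j (by omega) (by omega) hj
        have h2 := ih (j - 1 - i) (by omega) i (j - 1) (by omega) (by omega) (by omega)
        have e1 : pvPfx xs (i + 1) = pvPfx xs i + xs.getD i 0 := pvPfx_succ xs i (by omega)
        have e2 : pvPfx xs (j + 1) = pvPfx xs j + xs.getD j 0 := pvPfx_succ xs j hj
        have e3 : j - 1 + 1 = j := by omega
        rw [e3] at h2
        rw [h1, h2]
        omega
      · have hij' : i = j := by omega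
        subst hij'
        rw [pvD, dif_neg h, pvT, dif_neg h]
        have := pvPfx_succ xs i hj
        omega
  exact H (j - i) i j rfl hij hj

-- state of B's 1-D array while processing row i: entries before j0 already updated
def pvBState (xs : List Int) (i j0 : Nat) : List Int :=
  (List.range xs.length).map
    (fun k => if k < j0 then pvD xs (min i k) k else pvD xs (min (i + 1) k) k)

lemma pvInnerB (xs : List Int) (i : Nat) :
    ∀ c j0, xs.length - j0 = c → i < j0 → j0 ≤ xs.length →
    (PySem.List.pyRange (j0 : Int) (xs.length : Int) 1).foldl
      (fun diff j =>
        PySem.List.pySetD diff j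
          (max (PySem.List.pyGetD xs (i : Int) 0 - PySem.List.pyGetD diff j 0)
               (PySem.List.pyGetD xs j 0 - PySem.List.pyGetD diff (j - 1) 0)))
      (pvBState xs i j0)
    = pvBState xs i xs.length := by
  intro c
  induction c with
  | zero =>
    intro j0 hc hij hj0
    have : j0 = xs.length := by omega
    subst this
    rw [PySem.List.pyRange_one_eq_nil (by omega), List.foldl_nil]
  | succ c ih =>
    intro j0 hc hij hj0
    have hj0n : j0 < xs.length := by omega
    rw [PySem.List.pyRange_one_cons (by exact_mod_cast hj0n), List.foldl_cons]
    have hstep :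
        PySem.List.pySetD (pvBState xs i j0) (j0 : Int)
          (max (PySem.List.pyGetD xs (i : Int) 0 - PySem.List.pyGetD (pvBState xs i j0) (j0 : Int) 0)
               (PySem.List.pyGetD xs (j0 : Int) 0 -
                 PySem.List.pyGetD (pvBState xs i j0) ((j0 : Int) - 1) 0))
        = pvBState xs i (j0 + 1) := by
      have g1 : PySem.List.pyGetD (pvBState xs i j0) (j0 : Int) 0 = pvD xs (i + 1) j0 := by
        unfold pvBState
        rw [PySem.List.pyGetD_natCast, PySem.List.getD_map_range _ _ _ _ hj0n,
          if_neg (by omega), Nat.min_eq_left (by omega)]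
      have g2 : PySem.List.pyGetD (pvBState xs i j0) ((j0 : Int) - 1) 0 = pvD xs i (j0 - 1) := by
        unfold pvBState
        rw [show ((j0 : Int) - 1) = ((j0 - 1 : Nat) : Int) by omega,
          PySem.List.pyGetD_natCast, PySem.List.getD_map_range _ _ _ _ (by omega),
          if_pos (by omega), Nat.min_eq_left (by omega)]
      rw [g1, g2, PySem.List.pyGetD_natCast, PySem.List.pyGetD_natCast]
      have hv : max (xs.getD i 0 - pvD xs (i + 1) j0) (xs.getD j0 0 - pvD xs i (j0 - 1))
          = pvD xs i j0 := by
        conv_rhs => rw [pvD]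
        rw [dif_pos hij]
      rw [hv]
      unfold pvBState
      rw [PySem.List.pySetD_natCast, pvSetMapRange _ _ hj0n]
      apply List.map_congr_left
      intro k hk
      simp only [List.mem_range] at hk
      by_cases hkj : k = j0
      · subst hkj
        rw [if_pos rfl, if_pos (by omega), Nat.min_eq_left (by omega)]
      · rw [if_neg hkj]
        by_cases hlt : k < j0
        · rw [if_pos hlt, if_pos (by omega)]
        · rw [if_neg hlt, if_neg (by omega)]
    rw [hstep, show ((j0 : Int) + 1) = ((j0 + 1 : Nat) : Int) by omega]
    exact ih (j0 + 1) (by omega) (by omega) (by omega)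

lemma pvOuterB (xs : List Int) :
    ∀ m, m < xs.length → ∀ init, init = (List.range xs.length).map (fun k => pvD xs (min m k) k) →
    (PySem.List.pyRange ((m : Int) - 1) (-1) (-1)).foldl
      (fun diff i =>
        (PySem.List.pyRange (i + 1) (xs.length : Int) 1).foldl
          (fun diff j =>
            PySem.List.pySetD diff j
              (max (PySem.List.pyGetD xs i 0 - PySem.List.pyGetD diff j 0)
                   (PySem.List.pyGetD xs j 0 - PySem.List.pyGetD diff (j - 1) 0)))
          diff)
      init
    = (List.range xs.length).map (fun k => pvD xs (min 0 k) k) := by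
  intro m
  induction m with
  | zero =>
    intro _ init hinit
    subst hinit
    rw [show ((0 : Nat) : Int) - 1 = (-1 : Int) by norm_num,
      PySem.List.pyRange_neg_one_eq_nil (by omega), List.foldl_nil]
  | succ m ih =>
    intro hm init hinit
    subst hinit
    rw [show ((m + 1 : Nat) : Int) - 1 = ((m : Nat) : Int) by omega,
      PySem.List.pyRange_neg_one_cons (by omega), List.foldl_cons]
    have hinit : (List.range xs.length).map (fun k => pvD xs (min (m + 1) k) k)
        = pvBState xs m (m + 1) := by
      unfold pvBState
      apply List.map_congr_left
      intro k hk
      by_cases hlt : k < m + 1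
      · rw [if_pos hlt, show min (m + 1) k = min m k by omega]
      · rw [if_neg hlt]
    rw [hinit, show ((m : Nat) : Int) + 1 = ((m + 1 : Nat) : Int) by omega,
      pvInnerB xs m (xs.length - (m + 1)) (m + 1) rfl (by omega) (by omega)]
    have hfin : pvBState xs m xs.length
        = (List.range xs.length).map (fun k => pvD xs (min m k) k) := by
      unfold pvBState
      apply List.map_congr_left
      intro k hk
      simp only [List.mem_range] at hk
      rw [if_pos hk]
    rw [hfin]
    exact ih (by omega) _ rfl

lemma pvAltB_eq (xs : List Int) (hx : xs ≠ []) :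
    timber_bottom_up_alt xs = pvT xs 0 (xs.length - 1) := by
  have hn : 0 < xs.length := List.length_pos_iff.mpr hx
  unfold timber_bottom_up_alt
  simp only [PySem.List.len_eq]
  have hinit : xs = (List.range xs.length).map
      (fun k => pvD xs (min (xs.length - 1) k) k) := by
    apply List.ext_getElem
    · simp
    intro i h1 h2
    simp only [List.getElem_map, List.getElem_range]
    rw [show min (xs.length - 1) i = i by omega, pvD, dif_neg (by omega)]
    exact (List.getD_eq_getElem xs 0 h1).symm
  rw [show ((xs.length : Int) - 2) = (((xs.length - 1 : Nat)) : Int) - 1 by omega]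
  rw [pvOuterB xs (xs.length - 1) (by omega) xs hinit,
    show ((xs.length : Int) - 1) = ((xs.length - 1 : Nat) : Int) by omega,
    PySem.List.pyGetD_natCast, PySem.List.getD_map_range _ _ _ _ (by omega),
    Nat.min_eq_left (by omega)]
  have hsum : pvPfx xs xs.length = xs.sum := by
    unfold pvPfx
    rw [List.take_length]
  have hd := pvD_eq_pvT xs 0 (xs.length - 1) (by omega) (by omega)
  rw [show xs.length - 1 + 1 = xs.length by omega] at hd
  have h2 : xs.sum + pvD xs 0 (xs.length - 1) = 2 * pvT xs 0 (xs.length - 1) := by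
    rw [hd, pvPfx_zero]
    omega
  rw [h2, PySem.Int.floordiv_eq_ediv_of_pos (by norm_num)]
  omega

-- ===== VERDICT (by name: the statement is the Claim_ definition above) =====
theorem timber_bottom_up_spec : Claim_equal_timber_bottom_up := by
  intro xs _ hpre
  unfold Spec_timber_bottom_up
  rw [pvA_eq xs hpre, pvAltB_eq xs hpre]
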